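-- pv_equiv track=rewrite | github.com/Kudostoy0u/Scio.ly | snth/run_tests.py | bfs_min_steps
-- ===== SOURCE A (Python) =====
-- def bfs_min_steps(s: str, t: str, kmax: int) -> int:
--     if s == t:
--         return 0
--     if s[0] != t[0]:
--         return -1 if kmax >= 0 else -1
--     n = len(s)
--     from collections import deque
--     q = deque([s])
--     seen = {s}
--     steps = 0
--     while q and steps < kmax:
--         steps += 1
--         for _ in range(len(q)):
--             cur = q.popleft()
--             # generate all choices via bitmask for positions 1..n-1
--             for mask in range(1 << (n - 1)):
--                 arr = list(cur)
--                 for i in range(1, n):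
--                     if (mask >> (i - 1)) & 1:
--                         arr[i] = cur[i - 1]
--                     else:
--                         arr[i] = cur[i]
--                 nxt = ''.join(arr)
--                 if nxt not in seen:
--                     if nxt == t:
--                         return steps
--                     seen.add(nxt)
--                     q.append(nxt)
--     return -1
-- ===== SOURCE B (Python) =====
-- def bfs_min_steps(s: str, t: str, kmax: int) -> int:
--     # Each step every position i>=1 may copy its left neighbour's current value
--     # (simultaneously) or keep its own.  t is reachable iff there is a
--     # non-decreasing source map p with p(i) <= i and t[i] == s[p(i)]; the
--     # minimum number of steps is max_i (i - p(i)) for the pointwise-largest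
--     # such map, computed by one backward greedy scan.
--     if s == t:
--         return 0
--     if len(s) != len(t) or not s or s[0] != t[0]:
--         return -1
--     n = len(s)
--     p = n  # upper bound for the next source index (from position i+1)
--     worst = 0
--     for i in range(n - 1, -1, -1):
--         j = min(i, p)
--         while j >= 0 and s[j] != t[i]:
--             j -= 1
--         if j < 0:
--             return -1
--         p = j
--         if i - j > worst:
--             worst = i - j
--     return worst if worst <= kmax else -1
-- ===== Notes on version B (the rewrite author's own statement) =====
-- stated objective: alternative
-- what changed: Replaced the breadth-first search over all 2^(n-1) simultaneous-copy successors by a backward greedy scan computing the pointwise-maximal monotone source map p (t[i]=s[p(i)], p(i)<=i, non-decreasing); the answer is max_i(i-p(i)) if <= kmax, else -1. Pre_ excludes only the inputs (s != t with s or t empty) on which A raises IndexError at s[0]/t[0]; B returns -1 there.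
import Mathlib
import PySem

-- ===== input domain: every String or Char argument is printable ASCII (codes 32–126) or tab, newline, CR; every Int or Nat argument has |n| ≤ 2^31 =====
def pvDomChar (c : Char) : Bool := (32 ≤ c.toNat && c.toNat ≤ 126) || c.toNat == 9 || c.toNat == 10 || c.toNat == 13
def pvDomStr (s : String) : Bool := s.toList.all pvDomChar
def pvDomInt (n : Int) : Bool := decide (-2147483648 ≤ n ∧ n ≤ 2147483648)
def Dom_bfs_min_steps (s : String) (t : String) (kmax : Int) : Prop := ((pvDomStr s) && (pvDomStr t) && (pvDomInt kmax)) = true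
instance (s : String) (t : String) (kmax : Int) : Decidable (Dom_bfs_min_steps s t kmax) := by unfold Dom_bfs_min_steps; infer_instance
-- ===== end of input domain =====

-- B replaces A's breadth-first search over all simultaneous-copy successors by a
-- backward greedy scan over a monotone source-map characterization of reachability
-- (objective: alternative).


-- ===== PORT A =====
-- arr = list(cur); for i in range(1, n): arr[i] = cur[i-1] if bit else cur[i]
-- (all indices are in range, so List.getD / List.set are exact here)
def pvGenNext (cur : List Char) (n : Nat) (mask : Nat) : List Char :=
  (List.range' 1 (n - 1)).foldl
    (fun arr i => arr.set i (if (mask >>> (i - 1)) &&& 1 = 1 then cur.getD (i - 1) ' ' else cur.getD i ' '))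
    cur

-- for mask in range(1 << (n-1)): … ; `.error ()` = the `return steps` early exit
def pvMaskLoop (t : String) (cur : List Char) (n : Nat) (masks : List Nat)
    (seen : PySem.Set String) (qa : List String) :
    Except Unit (PySem.Set String × List String) :=
  match masks with
  | [] => .ok (seen, qa)
  | m :: ms =>
    let nxt := String.ofList (pvGenNext cur n m)
    if PySem.Set.contains seen nxt then pvMaskLoop t cur n ms seen qa
    else if nxt = t then .error ()
    else pvMaskLoop t cur n ms (PySem.Set.add seen nxt) (qa ++ [nxt])

-- for _ in range(len(q)): cur = q.popleft(); …  (new strings collect in qa)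
def pvLevelLoop (t : String) (n : Nat) (qs : List String)
    (seen : PySem.Set String) (qa : List String) :
    Except Unit (PySem.Set String × List String) :=
  match qs with
  | [] => .ok (seen, qa)
  | cur :: rest =>
    match pvMaskLoop t cur.toList n (List.range (2 ^ (n - 1))) seen qa with
    | .error () => .error ()
    | .ok (seen', qa') => pvLevelLoop t n rest seen' qa'

-- while q and steps < kmax: steps += 1; <process one level>
def pvBfsLoop (t : String) (n : Nat) (q : List String) (seen : PySem.Set String)
    (steps kmax : Int) : Int :=
  if h : q ≠ [] ∧ steps < kmax then
    match pvLevelLoop t n q seen [] with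
    | .error () => steps + 1
    | .ok (seen', q') => pvBfsLoop t n q' seen' (steps + 1) kmax
  else -1
termination_by (kmax - steps).toNat
decreasing_by omega

def bfs_min_steps (s : String) (t : String) (kmax : Int) : Int :=
  if s = t then 0
  else
    match PySem.Str.pyGet? s 0, PySem.Str.pyGet? t 0 with
    | some c0, some d0 =>
      if c0 ≠ d0 then -1
      else pvBfsLoop t s.toList.length [s] (PySem.Set.ofList [s]) 0 kmax
    | _, _ => -1  -- s[0] / t[0] raises IndexError in Python: outside Pre_

-- ===== PORT B =====
-- while j >= 0 and s[j] != t[i]: j -= 1   (j < len(s) at every probe, so getD is exact)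
def pvScanDown (sL : List Char) (c : Char) (j : Int) : Int :=
  if h : 0 ≤ j ∧ sL.getD j.toNat ' ' ≠ c then pvScanDown sL c (j - 1) else j
termination_by (j + 1).toNat
decreasing_by omega

-- for i in range(n-1, -1, -1): …  (m = i + 1; `none` = the early `return -1`)
def pvAltLoop (sL tL : List Char) : Nat → Int → Int → Option Int
  | 0, _, worst => some worst
  | m + 1, p, worst =>
    let j := pvScanDown sL (tL.getD m ' ') (min (m : Int) p)
    if j < 0 then none
    else pvAltLoop sL tL m j (if (m : Int) - j > worst then (m : Int) - j else worst)

def bfs_min_steps_alt (s : String) (t : String) (kmax : Int) : Int :=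
  if s = t then 0
  else
    if s.toList.length ≠ t.toList.length ∨ s.toList.length = 0 then -1
    else if s.toList.getD 0 ' ' ≠ t.toList.getD 0 ' ' then -1
    else
      match pvAltLoop s.toList t.toList s.toList.length (s.toList.length : Int) 0 with
      | none => -1
      | some w => if w ≤ kmax then w else -1

-- ===== PRECONDITION & SPEC =====
-- Pre_ excludes exactly the inputs where A raises IndexError (s ≠ t with s or t empty).
def Pre_bfs_min_steps (s : String) (t : String) (kmax : Int) : Prop :=
  s = t ∨ (s.toList ≠ [] ∧ t.toList ≠ [])
instance (s : String) (t : String) (kmax : Int) : Decidable (Pre_bfs_min_steps s t kmax) := by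
  unfold Pre_bfs_min_steps; infer_instance
def pvWitness_bfs_min_steps : String × String × Int := ("aba", "aab", 2)

def Spec_bfs_min_steps (s : String) (t : String) (kmax : Int) (out : Int) : Prop := out = bfs_min_steps_alt s t kmax
instance (s : String) (t : String) (kmax : Int) (out : Int) : Decidable (Spec_bfs_min_steps s t kmax out) := by unfold Spec_bfs_min_steps; infer_instance

-- ===== CLAIM (what is proved, stated in full; the proofs are below) =====
def Claim_equal_bfs_min_steps : Prop := ∀ (s : String) (t : String) (kmax : Int), Dom_bfs_min_steps s t kmax → Pre_bfs_min_steps s t kmax → Spec_bfs_min_steps s t kmax (bfs_min_steps s t kmax)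

-- ===== LEMMAS AND PROOFS =====

-- One simultaneous copy-from-left step (on the character lists).
def PStep (c u : List Char) : Prop :=
  u.length = c.length ∧
  ∀ i, i < c.length →
    u.getD i ' ' = c.getD i ' ' ∨ (1 ≤ i ∧ u.getD i ' ' = c.getD (i - 1) ' ')

-- Reachable in at most k steps (the identity is a PStep, so this is cumulative).
def PReach (sL : List Char) : Nat → List Char → Prop
  | 0, u => u = sL
  | k + 1, u => ∃ c, PReach sL k c ∧ PStep c u

-- A monotone source map for the first m positions, capped by `cap`.
def PartialOK (sL tL : List Char) (m cap : Nat) (q : Nat → Nat) : Prop :=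
  (∀ i, i < m → q i ≤ i ∧ q i ≤ cap ∧ tL.getD i ' ' = sL.getD (q i) ' ') ∧
  (∀ i, i + 1 < m → q i ≤ q (i + 1))

-- max_{i<m} (i - q i)
def pvDisp (q : Nat → Nat) (m : Nat) : Nat :=
  ((List.range m).map (fun i => i - q i)).foldl max 0

theorem pstep_refl (c : List Char) : PStep c c := by
  exact ⟨rfl, fun i _ => Or.inl rfl⟩

theorem preach_length {sL : List Char} {k : Nat} {u : List Char}
    (h : PReach sL k u) : u.length = sL.length := by
  induction k generalizing u with
  | zero => simp only [PReach] at h; subst h; rfl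
  | succ k ih =>
    obtain ⟨c, hc, hs⟩ := h
    rw [hs.1, ih hc]

theorem preach_succ {sL : List Char} {k : Nat} {u : List Char}
    (h : PReach sL k u) : PReach sL (k + 1) u := ⟨u, h, pstep_refl u⟩

theorem preach_mono {sL : List Char} {j k : Nat} {u : List Char}
    (hjk : j ≤ k) (h : PReach sL j u) : PReach sL k u := by
  induction k with
  | zero => exact (Nat.le_zero.mp hjk) ▸ h
  | succ k ih =>
    rcases Nat.lt_or_ge j (k + 1) with h1 | h1
    · exact preach_succ (ih (Nat.lt_succ_iff.mp h1))
    · exact (Nat.le_antisymm hjk h1) ▸ h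

-- value of a fold of disjoint `set`s
theorem foldl_set_getD (f : Nat → Char) (l : List Nat) (arr : List Char) (j : Nat)
    (hl : ∀ i ∈ l, i < arr.length) :
    (l.foldl (fun a i => a.set i (f i)) arr).getD j ' ' =
      if j ∈ l then f j else arr.getD j ' ' := by
  induction l generalizing arr with
  | nil => simp
  | cons i tl ih =>
    have hi : i < arr.length := hl i (List.mem_cons_self)
    have hlen : (arr.set i (f i)).length = arr.length := by simp
    rw [List.foldl_cons, ih (arr.set i (f i)) (by rw [hlen]; exact fun x hx => hl x (List.mem_cons_of_mem _ hx))]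
    by_cases hjt : j ∈ tl
    · simp [hjt]
    · by_cases hji : j = i
      · subst hji
        rw [if_neg hjt, if_pos (List.mem_cons_self), List.getD_eq_getElem?_getD,
          List.getElem?_set_self hi]
        simp
      · have hmem : j ∈ i :: tl ↔ j ∈ tl := by
          simp [List.mem_cons, hji]
        rw [if_neg hjt, if_neg (fun hc => hjt (hmem.mp hc)), List.getD_eq_getElem?_getD,
          List.getElem?_set_ne (fun hc => hji hc.symm), ← List.getD_eq_getElem?_getD]

theorem genNext_length (cur : List Char) (n mask : Nat) (h : cur.length = n) :
    (pvGenNext cur n mask).length = n := by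
  unfold pvGenNext
  have h2 : ∀ (l : List Nat) (arr : List Char),
      (l.foldl (fun a i => a.set i (if (mask >>> (i - 1)) &&& 1 = 1 then cur.getD (i - 1) ' ' else cur.getD i ' ')) arr).length = arr.length := by
    intro l
    induction l with
    | nil => intro arr; rfl
    | cons x tl ih => intro arr; rw [List.foldl_cons, ih]; simp
  rw [h2, h]

theorem genNext_getD (cur : List Char) (n mask j : Nat) (h : cur.length = n) (hj : j < n) :
    (pvGenNext cur n mask).getD j ' ' =
      if 1 ≤ j then (if (mask >>> (j - 1)) &&& 1 = 1 then cur.getD (j - 1) ' ' else cur.getD j ' ')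
      else cur.getD 0 ' ' := by
  unfold pvGenNext
  rw [foldl_set_getD _ _ _ _ (by intro i hi; rw [h]; rcases List.mem_range'_1.mp hi with ⟨_, h2⟩; omega)]
  have hmem : j ∈ List.range' 1 (n - 1) ↔ 1 ≤ j := by
    rw [List.mem_range'_1]; omega
  by_cases h1 : 1 ≤ j
  · simp [hmem.mpr h1, h1]
  · have hj0 : j = 0 := by omega
    subst hj0
    simp [hmem]

theorem genNext_step (cur : List Char) (n mask : Nat) (h : cur.length = n) :
    PStep cur (pvGenNext cur n mask) := by
  constructor
  · rw [genNext_length cur n mask h, h]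
  · intro i hi
    rw [genNext_getD cur n mask i h (h ▸ hi)]
    by_cases h1 : 1 ≤ i
    · by_cases hb : (mask >>> (i - 1)) &&& 1 = 1
      · exact Or.inr ⟨h1, by rw [if_pos h1, if_pos hb]⟩
      · exact Or.inl (by rw [if_pos h1, if_neg hb])
    · have hi0 : i = 0 := by omega
      subst hi0; exact Or.inl (by simp)

-- binary encoding of a bit-vector, little-endian
def pvEnc : (Nat → Bool) → Nat → Nat
  | _, 0 => 0
  | g, m + 1 => (if g 0 then 1 else 0) + 2 * pvEnc (fun i => g (i + 1)) m

theorem pvEnc_lt (g : Nat → Bool) (m : Nat) : pvEnc g m < 2 ^ m := by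
  induction m generalizing g with
  | zero => simp [pvEnc]
  | succ m ih =>
    have h2 := ih (fun i => g (i + 1))
    unfold pvEnc
    by_cases h : g 0
    · simp only [h, if_true, pow_succ]
      omega
    · simp only [if_neg h, pow_succ]
      omega

theorem pvEnc_bit (m : Nat) (g : Nat → Bool) (k : Nat) :
    (pvEnc g m >>> k) &&& 1 = if k < m ∧ g k then 1 else 0 := by
  induction m generalizing g k with
  | zero => simp [pvEnc]
  | succ m ih =>
    unfold pvEnc
    rw [Nat.shiftRight_eq_div_pow, Nat.and_one_is_mod]
    cases k with
    | zero =>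
      simp only [Nat.pow_zero, Nat.div_one]
      rw [Nat.add_mul_mod_self_left]
      by_cases h : g 0 <;> simp [h]
    | succ k =>
      have h2 : ((if g 0 then 1 else 0) + 2 * pvEnc (fun i => g (i + 1)) m) / 2 ^ (k + 1)
          = pvEnc (fun i => g (i + 1)) m / 2 ^ k := by
        rw [pow_succ, mul_comm (2 ^ k) 2, ← Nat.div_div_eq_div_mul]
        congr 1
        rcases Bool.eq_false_or_eq_true (g 0) with h | h <;> simp [h] <;> omega
      rw [h2]
      have := ih (fun i => g (i + 1)) k
      rw [Nat.shiftRight_eq_div_pow, Nat.and_one_is_mod] at this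
      rw [this]
      by_cases hk : k < m <;> by_cases hg : g (k + 1) <;> simp [hk, hg] <;> omega

-- two equal-length lists agreeing on getD are equal
theorem list_ext_getD {u v : List Char} (hlen : u.length = v.length)
    (h : ∀ j, j < u.length → u.getD j ' ' = v.getD j ' ') : u = v := by
  apply List.ext_getElem hlen
  intro j h1 h2
  have h3 := h j h1
  rwa [List.getD_eq_getElem _ _ h1, List.getD_eq_getElem _ _ h2] at h3

theorem genNext_surj (cur u : List Char) (n : Nat) (h : cur.length = n) (hn : 1 ≤ n)
    (hu : PStep cur u) : ∃ mask < 2 ^ (n - 1), pvGenNext cur n mask = u := by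
  classical
  set g : Nat → Bool := fun b =>
    decide (u.getD (b + 1) ' ' = cur.getD b ' ' ∧ u.getD (b + 1) ' ' ≠ cur.getD (b + 1) ' ') with hg
  refine ⟨pvEnc g (n - 1), pvEnc_lt g (n - 1), ?_⟩
  apply list_ext_getD
  · rw [genNext_length cur n _ h, hu.1, h]
  · intro j hj
    rw [genNext_length cur n _ h] at hj
    rw [genNext_getD cur n _ j h hj]
    by_cases h1 : 1 ≤ j
    · rw [if_pos h1, pvEnc_bit]
      have hjn : j - 1 < n - 1 := by omega
      have hor := hu.2 j (by omega)
      by_cases hb : u.getD j ' ' = cur.getD (j - 1) ' ' ∧ u.getD j ' ' ≠ cur.getD j ' '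
      · have hgt : g (j - 1) = true := by
          rw [hg]
          simp only [decide_eq_true_eq]
          have : j - 1 + 1 = j := by omega
          rw [this]
          exact hb
        rw [if_pos (And.intro hjn hgt)]
        exact hb.1.symm
      · have hcur : u.getD j ' ' = cur.getD j ' ' := by
          rcases hor with h2 | h2
          · exact h2
          · by_cases h3 : u.getD j ' ' = cur.getD j ' '
            · exact h3
            · exact absurd ⟨h2.2, h3⟩ hb
        have hgt : ¬ (j - 1 < n - 1 ∧ g (j - 1) = true) := by
          intro hc
          apply hb
          have he : j - 1 + 1 = j := by omega
          have := hc.2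
          rw [hg] at this
          simp only [decide_eq_true_eq] at this
          rw [he] at this
          exact this
        rw [if_neg hgt]
        norm_num
        exact hcur.symm
    · have hj0 : j = 0 := by omega
      subst hj0
      rw [if_neg h1]
      rcases hu.2 0 (by omega) with h2 | h2
      · exact h2.symm
      · omega

-- successor relation as the port generates it
def SuccP (n : Nat) (c u : String) : Prop :=
  ∃ m < 2 ^ (n - 1), String.ofList (pvGenNext c.toList n m) = u

theorem succP_iff (n : Nat) (c u : String) (hc : c.toList.length = n) (hn : 1 ≤ n) :
    SuccP n c u ↔ PStep c.toList u.toList := by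
  constructor
  · rintro ⟨m, hm, hgen⟩
    have := genNext_step c.toList n m hc
    have hL : pvGenNext c.toList n m = u.toList := by
      have := congrArg String.toList hgen
      simpa using this
    rwa [hL] at this
  · intro hstep
    obtain ⟨mask, hlt, hgen⟩ := genNext_surj c.toList u.toList n hc hn hstep
    exact ⟨mask, hlt, by rw [hgen]; exact String.ofList_toList⟩

theorem maskLoop_spec (t : String) (curL : List Char) (n : Nat)
    (masks : List Nat) (seen : PySem.Set String) (qa : List String)
    (ht : t ∉ seen) :
    (∃ m ∈ masks, String.ofList (pvGenNext curL n m) = t) ∧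
      pvMaskLoop t curL n masks seen qa = .error () ∨
    (∀ m ∈ masks, String.ofList (pvGenNext curL n m) ≠ t) ∧
      ∃ seen' qa', pvMaskLoop t curL n masks seen qa = .ok (seen', qa') ∧
        (∀ x : String, x ∈ seen' ↔ x ∈ seen ∨ ∃ m ∈ masks, String.ofList (pvGenNext curL n m) = x) ∧
        (∀ x : String, x ∈ qa' ↔ x ∈ qa ∨ (x ∉ seen ∧ ∃ m ∈ masks, String.ofList (pvGenNext curL n m) = x)) := by
  induction masks generalizing seen qa with
  | nil =>
    right
    refine ⟨by simp, seen, qa, rfl, ?_, ?_⟩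
    · intro x; simp
    · intro x; simp
  | cons m ms ih =>
    simp only [pvMaskLoop]
    by_cases hc : PySem.Set.contains seen (String.ofList (pvGenNext curL n m))
    · rw [if_pos hc]
      have hmem : String.ofList (pvGenNext curL n m) ∈ seen := (PySem.Set.contains_iff _ _).mp hc
      have hne : String.ofList (pvGenNext curL n m) ≠ t := fun he => ht (he ▸ hmem)
      rcases ih seen qa ht with ⟨⟨m', hm', he'⟩, hres⟩ | ⟨hno, seen', qa', hres, hs', hq'⟩
      · exact Or.inl ⟨⟨m', List.mem_cons_of_mem _ hm', he'⟩, hres⟩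
      · refine Or.inr ⟨?_, seen', qa', hres, ?_, ?_⟩
        · intro m' hm'
          rcases List.mem_cons.mp hm' with h1 | h1
          · subst h1; exact hne
          · exact hno m' h1
        · intro x
          rw [hs' x]
          constructor
          · rintro (h1 | ⟨m', hm', he'⟩)
            · exact Or.inl h1
            · exact Or.inr ⟨m', List.mem_cons_of_mem _ hm', he'⟩
          · rintro (h1 | ⟨m', hm', he'⟩)
            · exact Or.inl h1
            · rcases List.mem_cons.mp hm' with h2 | h2
              · subst h2; exact Or.inl (he' ▸ hmem)
              · exact Or.inr ⟨m', h2, he'⟩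
        · intro x
          rw [hq' x]
          constructor
          · rintro (h1 | ⟨hx, m', hm', he'⟩)
            · exact Or.inl h1
            · exact Or.inr ⟨hx, m', List.mem_cons_of_mem _ hm', he'⟩
          · rintro (h1 | ⟨hx, m', hm', he'⟩)
            · exact Or.inl h1
            · rcases List.mem_cons.mp hm' with h2 | h2
              · subst h2; exact absurd (he' ▸ hmem) hx
              · exact Or.inr ⟨hx, m', h2, he'⟩
    · rw [if_neg hc]
      have hnm : String.ofList (pvGenNext curL n m) ∉ seen :=
        fun hx => hc ((PySem.Set.contains_iff _ _).mpr hx)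
      by_cases he : String.ofList (pvGenNext curL n m) = t
      · rw [if_pos he]
        exact Or.inl ⟨⟨m, List.mem_cons_self, he⟩, rfl⟩
      · rw [if_neg he]
        have ht' : t ∉ PySem.Set.add seen (String.ofList (pvGenNext curL n m)) := by
          intro hx
          rcases (PySem.Set.mem_add _ _ _).mp hx with h1 | h1
          · exact ht h1
          · exact he (h1.symm)
        rcases ih (PySem.Set.add seen (String.ofList (pvGenNext curL n m)))
            (qa ++ [String.ofList (pvGenNext curL n m)]) ht' with
          ⟨⟨m', hm', he'⟩, hres⟩ | ⟨hno, seen', qa', hres, hs', hq'⟩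
        · exact Or.inl ⟨⟨m', List.mem_cons_of_mem _ hm', he'⟩, hres⟩
        · refine Or.inr ⟨?_, seen', qa', hres, ?_, ?_⟩
          · intro m' hm'
            rcases List.mem_cons.mp hm' with h1 | h1
            · subst h1; exact he
            · exact hno m' h1
          · intro x
            rw [hs' x]
            constructor
            · rintro (h1 | ⟨m', hm', he'⟩)
              · rcases (PySem.Set.mem_add _ _ _).mp h1 with h2 | h2
                · exact Or.inl h2
                · exact Or.inr ⟨m, List.mem_cons_self, h2.symm⟩
              · exact Or.inr ⟨m', List.mem_cons_of_mem _ hm', he'⟩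
            · rintro (h1 | ⟨m', hm', he'⟩)
              · exact Or.inl ((PySem.Set.mem_add _ _ _).mpr (Or.inl h1))
              · rcases List.mem_cons.mp hm' with h2 | h2
                · subst h2
                  exact Or.inl ((PySem.Set.mem_add _ _ _).mpr (Or.inr he'.symm))
                · exact Or.inr ⟨m', h2, he'⟩
          · intro x
            rw [hq' x]
            constructor
            · rintro (h1 | ⟨hx, m', hm', he'⟩)
              · rcases List.mem_append.mp h1 with h2 | h2
                · exact Or.inl h2
                · have hxe : x = String.ofList (pvGenNext curL n m) := by
                    simpa using h2
                  exact Or.inr ⟨hxe ▸ hnm, m, List.mem_cons_self, hxe.symm⟩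
              · refine Or.inr ⟨fun hxs => hx ((PySem.Set.mem_add _ _ _).mpr (Or.inl hxs)),
                  m', List.mem_cons_of_mem _ hm', he'⟩
            · rintro (h1 | ⟨hx, m', hm', he'⟩)
              · exact Or.inl (List.mem_append.mpr (Or.inl h1))
              · by_cases hxe : x = String.ofList (pvGenNext curL n m)
                · exact Or.inl (List.mem_append.mpr (Or.inr (by simp [hxe])))
                · rcases List.mem_cons.mp hm' with h2 | h2
                  · subst h2; exact absurd he'.symm hxe
                  · refine Or.inr ⟨?_, m', h2, he'⟩
                    intro hxs
                    rcases (PySem.Set.mem_add _ _ _).mp hxs with h3 | h3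
                    · exact hx h3
                    · exact hxe h3

theorem levelLoop_spec (t : String) (n : Nat) (qs : List String)
    (seen : PySem.Set String) (qa : List String) (ht : t ∉ seen) :
    (∃ cur ∈ qs, SuccP n cur t) ∧ pvLevelLoop t n qs seen qa = .error () ∨
    (∀ cur ∈ qs, ¬ SuccP n cur t) ∧
      ∃ seen' qa', pvLevelLoop t n qs seen qa = .ok (seen', qa') ∧
        (∀ x : String, x ∈ seen' ↔ x ∈ seen ∨ ∃ cur ∈ qs, SuccP n cur x) ∧
        (∀ x : String, x ∈ qa' ↔ x ∈ qa ∨ (x ∉ seen ∧ ∃ cur ∈ qs, SuccP n cur x)) := by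
  induction qs generalizing seen qa with
  | nil =>
    right
    refine ⟨by simp, seen, qa, rfl, ?_, ?_⟩
    · intro x; simp
    · intro x; simp
  | cons cur rest ih =>
    simp only [pvLevelLoop]
    rcases maskLoop_spec t cur.toList n (List.range (2 ^ (n - 1))) seen qa ht with
      ⟨⟨m, hm, he⟩, hres⟩ | ⟨hno, seen1, qa1, hres, hs1, hq1⟩
    · rw [hres]
      exact Or.inl ⟨⟨cur, List.mem_cons_self, m, List.mem_range.mp hm, he⟩, rfl⟩
    · rw [hres]
      have ht1 : t ∉ seen1 := by
        intro hx
        rcases (hs1 t).mp hx with h1 | ⟨m, hm, he⟩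
        · exact ht h1
        · exact hno m hm he
      rcases ih seen1 qa1 ht1 with ⟨⟨cur', hcur', hsucc'⟩, hres'⟩ | ⟨hno', seen', qa', hres', hs', hq'⟩
      · exact Or.inl ⟨⟨cur', List.mem_cons_of_mem _ hcur', hsucc'⟩, hres'⟩
      · refine Or.inr ⟨?_, seen', qa', hres', ?_, ?_⟩
        · intro c hc
          rcases List.mem_cons.mp hc with h1 | h1
          · subst h1
            rintro ⟨m, hm, he⟩
            exact hno m (List.mem_range.mpr hm) he
          · exact hno' c h1
        · intro x
          rw [hs' x]
          constructor
          · rintro (h1 | ⟨c, hc, hsucc⟩)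
            · rcases (hs1 x).mp h1 with h2 | ⟨m, hm, he⟩
              · exact Or.inl h2
              · exact Or.inr ⟨cur, List.mem_cons_self, m, List.mem_range.mp hm, he⟩
            · exact Or.inr ⟨c, List.mem_cons_of_mem _ hc, hsucc⟩
          · rintro (h1 | ⟨c, hc, hsucc⟩)
            · exact Or.inl ((hs1 x).mpr (Or.inl h1))
            · rcases List.mem_cons.mp hc with h2 | h2
              · subst h2
                obtain ⟨m, hm, he⟩ := hsucc
                exact Or.inl ((hs1 x).mpr (Or.inr ⟨m, List.mem_range.mpr hm, he⟩))
              · exact Or.inr ⟨c, h2, hsucc⟩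
        · intro x
          rw [hq' x]
          constructor
          · rintro (h1 | ⟨hx1, c, hc, hsucc⟩)
            · rcases (hq1 x).mp h1 with h2 | ⟨hx, m, hm, he⟩
              · exact Or.inl h2
              · exact Or.inr ⟨hx, cur, List.mem_cons_self, m, List.mem_range.mp hm, he⟩
            · refine Or.inr ⟨fun hxs => hx1 ((hs1 x).mpr (Or.inl hxs)),
                c, List.mem_cons_of_mem _ hc, hsucc⟩
          · rintro (h1 | ⟨hx, c, hc, hsucc⟩)
            · exact Or.inl ((hq1 x).mpr (Or.inl h1))
            · by_cases hx1 : x ∈ seen1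
              · rcases (hs1 x).mp hx1 with h2 | ⟨m, hm, he⟩
                · exact absurd h2 hx
                · exact Or.inl ((hq1 x).mpr (Or.inr ⟨hx, m, hm, he⟩))
              · rcases List.mem_cons.mp hc with h2 | h2
                · subst h2
                  obtain ⟨m, hm, he⟩ := hsucc
                  exact absurd ((hs1 x).mpr (Or.inr ⟨m, List.mem_range.mpr hm, he⟩)) hx1
                · exact Or.inr ⟨hx1, c, h2, hsucc⟩

-- if level e+1 adds nothing new, reachability has stabilized
theorem reach_stab (sL : List Char) (e : Nat)
    (hsub : ∀ u, PReach sL (e + 1) u → PReach sL e u) :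
    ∀ j u, PReach sL (e + 1 + j) u → PReach sL (e + 1) u := by
  intro j
  induction j with
  | zero => exact fun u h => h
  | succ j ih =>
    rintro u ⟨c, hc, hstep⟩
    exact ⟨c, hsub c (ih c hc), hstep⟩

theorem bfsLoop_spec (s t : String) (n : Nat) (hn : 1 ≤ n) (hsl : s.toList.length = n)
    (d : Nat) (q : List String) (seen : PySem.Set String) (kmax : Int)
    (hseen : ∀ u : String, u ∈ seen ↔ PReach s.toList d u.toList)
    (hq : ∀ u : String, u ∈ q ↔ (PReach s.toList d u.toList ∧ ∀ k, k < d → ¬ PReach s.toList k u.toList))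
    (htn : ¬ PReach s.toList d t.toList) :
    (∀ K : Nat, PReach s.toList K t.toList → (∀ k, k < K → ¬ PReach s.toList k t.toList) →
      pvBfsLoop t n q seen (d : Int) kmax = if (K : Int) ≤ kmax then (K : Int) else -1) ∧
    ((∀ k, ¬ PReach s.toList k t.toList) → pvBfsLoop t n q seen (d : Int) kmax = -1) := by
  have main : ∀ fuel : Nat, ∀ (d : Nat) (q : List String) (seen : PySem.Set String),
      (kmax - (d : Int)).toNat ≤ fuel →
      (∀ u : String, u ∈ seen ↔ PReach s.toList d u.toList) →
      (∀ u : String, u ∈ q ↔ (PReach s.toList d u.toList ∧ ∀ k, k < d → ¬ PReach s.toList k u.toList)) →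
      ¬ PReach s.toList d t.toList →
      (∀ K : Nat, PReach s.toList K t.toList → (∀ k, k < K → ¬ PReach s.toList k t.toList) →
        pvBfsLoop t n q seen (d : Int) kmax = if (K : Int) ≤ kmax then (K : Int) else -1) ∧
      ((∀ k, ¬ PReach s.toList k t.toList) → pvBfsLoop t n q seen (d : Int) kmax = -1) := by
    intro fuel
    induction fuel with
    | zero =>
      intro d q seen hfuel hseen hq htn
      have hkm : ¬ ((d : Int) < kmax) := by omega
      rw [pvBfsLoop, dif_neg (fun hc => hkm hc.2)]
      constructor
      · intro K hK hKmin
        have hKd : d < K := by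
          by_contra hle
          exact htn (preach_mono (by omega) hK)
        rw [if_neg (by push_cast; omega)]
      · intro _; rfl
    | succ fuel ih =>
      intro d q seen hfuel hseen hq htn
      have hts : t ∉ seen := fun hx => htn ((hseen t).mp hx)
      by_cases hcond : q ≠ [] ∧ (d : Int) < kmax
      · rw [pvBfsLoop, dif_pos hcond]
        have hqlen : ∀ cur : String, cur ∈ q → cur.toList.length = n := by
          intro cur hcur
          rw [preach_length ((hq cur).mp hcur).1, hsl]
        rcases levelLoop_spec t n q seen [] hts with
          ⟨⟨cur, hcur, hsucc⟩, hres⟩ | ⟨hno, seen', qa', hres, hs', hq'⟩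
        · rw [hres]
          have hreach1 : PReach s.toList (d + 1) t.toList :=
            ⟨cur.toList, ((hq cur).mp hcur).1,
              (succP_iff n cur t (hqlen cur hcur) hn).mp hsucc⟩
          have hnotk : ∀ k, k ≤ d → ¬ PReach s.toList k t.toList := by
            intro k hk hreach
            exact htn (preach_mono hk hreach)
          constructor
          · intro K hK hKmin
            have hKeq : K = d + 1 := by
              by_contra hne
              rcases Nat.lt_or_ge K (d + 1) with h1 | h1
              · exact hnotk K (by omega) hK
              · exact hKmin (d + 1) (by omega) hreach1
            subst hKeq
            rw [if_pos (by push_cast; omega)]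
            push_cast; ring
          · intro hnone
            exact absurd hreach1 (hnone (d + 1))
        · rw [hres]
          -- parent of a new node lies in the current layer
          have hparent : ∀ x : String, PReach s.toList (d + 1) x.toList →
              ¬ PReach s.toList d x.toList → ∃ cur ∈ q, SuccP n cur x := by
            intro x hx hnx
            obtain ⟨cL, hcL, hstep⟩ := hx
            have hCmem : String.ofList cL ∈ q := by
              rw [hq (String.ofList cL)]
              constructor
              · simpa using hcL
              · intro k hk hkreach
                apply hnx
                apply preach_mono (show k + 1 ≤ d by omega)
                exact ⟨cL, by simpa using hkreach, hstep⟩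
            refine ⟨String.ofList cL, hCmem, ?_⟩
            rw [succP_iff n (String.ofList cL) x (by simp; rw [preach_length hcL, hsl]) hn]
            simpa using hstep
          have hseen'' : ∀ u : String, u ∈ seen' ↔ PReach s.toList (d + 1) u.toList := by
            intro u
            rw [hs' u]
            constructor
            · rintro (h1 | ⟨cur, hcur, hsucc⟩)
              · exact preach_succ ((hseen u).mp h1)
              · exact ⟨cur.toList, ((hq cur).mp hcur).1,
                  (succP_iff n cur u (hqlen cur hcur) hn).mp hsucc⟩
            · intro h1
              by_cases h2 : PReach s.toList d u.toList
              · exact Or.inl ((hseen u).mpr h2)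
              · exact Or.inr (hparent u h1 h2)
          have hq'' : ∀ u : String, u ∈ qa' ↔ (PReach s.toList (d + 1) u.toList ∧
              ∀ k, k < d + 1 → ¬ PReach s.toList k u.toList) := by
            intro u
            rw [hq' u]
            simp only [List.not_mem_nil, false_or]
            constructor
            · rintro ⟨hu1, cur, hcur, hsucc⟩
              have hnd : ¬ PReach s.toList d u.toList := fun hc => hu1 ((hseen u).mpr hc)
              refine ⟨⟨cur.toList, ((hq cur).mp hcur).1,
                  (succP_iff n cur u (hqlen cur hcur) hn).mp hsucc⟩, ?_⟩
              intro k hk hkreach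
              exact hnd (preach_mono (by omega) hkreach)
            · rintro ⟨h1, h2⟩
              have hnd : ¬ PReach s.toList d u.toList := h2 d (by omega)
              exact ⟨fun hc => hnd ((hseen u).mp hc), hparent u h1 hnd⟩
          have htn' : ¬ PReach s.toList (d + 1) t.toList := by
            intro hc
            obtain ⟨cur, hcur, hsucc⟩ := hparent t hc htn
            exact hno cur hcur hsucc
          have hrec := ih (d + 1) qa' seen' (by omega) hseen'' hq'' htn'
          have hcast : (d : Int) + 1 = ((d + 1 : Nat) : Int) := by push_cast; ring
          rw [hcast]
          exact hrec
      · rw [pvBfsLoop, dif_neg hcond]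
        by_cases hqe : q = []
        · -- the frontier is empty: reachability has stabilized, t is never reached
          have hnone : ∀ k, ¬ PReach s.toList k t.toList := by
            cases d with
            | zero =>
              exfalso
              have := (hq s).mpr ⟨by show s.toList = s.toList; rfl, fun k hk => absurd hk (by omega)⟩
              rw [hqe] at this
              simp at this
            | succ e =>
              have hsub : ∀ u, PReach s.toList (e + 1) u → PReach s.toList e u := by
                intro u hu
                by_contra hnu
                have hmem := (hq (String.ofList u)).mpr
                  ⟨by simpa using hu, by
                    intro k hk hkreach
                    have : PReach s.toList k u := by simpa using hkreach
                    exact hnu (preach_mono (show k ≤ e by omega) this)⟩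
                rw [hqe] at hmem
                simp at hmem
              intro k hreach
              apply htn
              rcases Nat.lt_or_ge k (e + 1) with h1 | h1
              · exact preach_mono (by omega) hreach
              · have : k = e + 1 + (k - (e + 1)) := by omega
                rw [this] at hreach
                exact reach_stab s.toList e hsub _ t.toList hreach
          constructor
          · intro K hK _
            exact absurd hK (hnone K)
          · intro _; rfl
        · have hkm : ¬ ((d : Int) < kmax) := by
            by_contra hc
            exact hcond ⟨hqe, hc⟩
          constructor
          · intro K hK hKmin
            have hKd : d < K := by
              by_contra hle
              exact htn (preach_mono (by omega) hK)
            rw [if_neg (by push_cast; omega)]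
          · intro _; rfl
  exact main (kmax - (d : Int)).toNat d q seen (le_refl _) hseen hq htn

theorem scanDown_spec (sL : List Char) (c : Char) (j : Int) :
    (pvScanDown sL c j < 0 ∧ ∀ j' : Nat, (j' : Int) ≤ j → sL.getD j' ' ' ≠ c) ∨
    (∃ r : Nat, pvScanDown sL c j = (r : Int) ∧ (r : Int) ≤ j ∧ sL.getD r ' ' = c ∧
      ∀ j' : Nat, r < j' → (j' : Int) ≤ j → sL.getD j' ' ' ≠ c) := by
  induction j using pvScanDown.induct sL c with
  | case1 j h ih =>
    rw [pvScanDown, dif_pos h]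
    rcases ih with ⟨hneg, hall⟩ | ⟨r, hr, hle, heq, hmax⟩
    · left
      refine ⟨hneg, ?_⟩
      intro j' hj'
      by_cases hje : (j' : Int) = j
      · have : j' = j.toNat := by omega
        subst this
        exact h.2
      · exact hall j' (by omega)
    · right
      refine ⟨r, hr, by omega, heq, ?_⟩
      intro j' hrj' hj'
      by_cases hje : (j' : Int) = j
      · have : j' = j.toNat := by omega
        subst this
        exact h.2
      · exact hmax j' hrj' (by omega)
  | case2 j h =>
    rw [pvScanDown, dif_neg h]
    rcases Int.lt_or_le j 0 with hj | hj
    · left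
      exact ⟨hj, fun j' hj' => absurd hj' (by omega)⟩
    · right
      push Not at h
      refine ⟨j.toNat, by omega, by omega, h (by omega), ?_⟩
      intro j' hrj' hj'
      omega

theorem pvDisp_zero (q : Nat → Nat) : pvDisp q 0 = 0 := rfl

theorem pvDisp_succ (q : Nat → Nat) (m : Nat) :
    pvDisp q (m + 1) = max (pvDisp q m) (m - q m) := by
  unfold pvDisp
  rw [List.range_succ, List.map_append, List.foldl_append]
  simp

theorem pvDisp_congr {a b : Nat → Nat} (m : Nat) (h : ∀ i, i < m → a i = b i) :
    pvDisp a m = pvDisp b m := by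
  induction m with
  | zero => rfl
  | succ m ih =>
    rw [pvDisp_succ, pvDisp_succ, ih (fun i hi => h i (Nat.lt_succ_of_lt hi)), h m (Nat.lt_succ_self m)]

theorem le_pvDisp (q : Nat → Nat) {i m : Nat} (h : i < m) : i - q i ≤ pvDisp q m := by
  induction m with
  | zero => omega
  | succ m ih =>
    rw [pvDisp_succ]
    rcases Nat.lt_or_ge i m with h1 | h1
    · exact le_max_of_le_left (ih h1)
    · have : i = m := by omega
      subst this; exact le_max_right _ _

theorem pvDisp_le (q : Nat → Nat) (m w : Nat) (h : ∀ i, i < m → i - q i ≤ w) :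
    pvDisp q m ≤ w := by
  induction m with
  | zero => simp [pvDisp_zero]
  | succ m ih =>
    rw [pvDisp_succ]
    exact max_le (ih (fun i hi => h i (Nat.lt_succ_of_lt hi))) (h m (Nat.lt_succ_self m))

theorem pvDisp_anti {a b : Nat → Nat} (m : Nat) (h : ∀ i, i < m → a i ≤ b i) :
    pvDisp b m ≤ pvDisp a m := by
  apply pvDisp_le
  intro i hi
  exact le_trans (Nat.sub_le_sub_left (h i hi) i) (le_pvDisp a hi)

theorem partial_chain {sL tL : List Char} {m cap : Nat} {q : Nat → Nat}
    (h : PartialOK sL tL m cap q) {i j : Nat} (hij : i ≤ j) (hj : j < m) : q i ≤ q j := by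
  induction j with
  | zero =>
    have hi0 : i = 0 := Nat.le_zero.mp hij
    subst hi0; rfl
  | succ j ih =>
    rcases Nat.lt_or_ge i (j + 1) with h1 | h1
    · exact le_trans (ih (by omega) (by omega)) (h.2 j hj)
    · have : i = j + 1 := by omega
      subst this; rfl

theorem altLoop_spec (sL tL : List Char) :
    ∀ (m : Nat) (cap : Nat) (worst : Int), 0 ≤ worst →
    (∃ g : Nat → Nat, PartialOK sL tL m cap g ∧
        (∀ q, PartialOK sL tL m cap q → ∀ i, i < m → q i ≤ g i) ∧
        pvAltLoop sL tL m (cap : Int) worst = some (max worst (pvDisp g m))) ∨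
    ((∀ q, ¬ PartialOK sL tL m cap q) ∧ pvAltLoop sL tL m (cap : Int) worst = none) := by
  intro m
  induction m with
  | zero =>
    intro cap worst hw
    left
    refine ⟨fun _ => 0, ⟨fun i hi => absurd hi (by omega), fun i hi => absurd hi (by omega)⟩,
      fun q _ i hi => absurd hi (by omega), ?_⟩
    simp only [pvAltLoop, pvDisp_zero]
    rw [max_eq_left (by omega)]
  | succ m ih =>
    intro cap worst hw
    simp only [pvAltLoop]
    have hmin : min (m : Int) (cap : Int) = ((min m cap : Nat) : Int) := by
      omega
    rcases scanDown_spec sL (tL.getD m ' ') (min (m : Int) (cap : Int)) with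
      ⟨hneg, hall⟩ | ⟨r, hr, hle, heq, hmax⟩
    · rw [if_pos hneg]
      right
      refine ⟨?_, rfl⟩
      intro q hq
      obtain ⟨hqm1, hqm2, hqm3⟩ := hq.1 m (by omega)
      exact hall (q m) (by omega) hqm3.symm
    · rw [hr, if_neg (by omega)]
      have hrm : r ≤ m := by omega
      have hrcap : r ≤ cap := by omega
      have hwmax : (if (m : Int) - (r : Int) > worst then (m : Int) - (r : Int) else worst)
          = max worst ((m - r : Nat) : Int) := by
        split_ifs with hh
        · rw [max_eq_right (by push_cast; omega)]
          push_cast; omega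
        · rw [max_eq_left (by push_cast; omega)]
      rw [hwmax]
      rcases ih r (max worst ((m - r : Nat) : Int)) (by positivity) with
        ⟨g', hg', hgmax', hval'⟩ | ⟨hno', hval'⟩
      · left
        refine ⟨fun i => if i = m then r else g' i, ?_, ?_, ?_⟩
        · constructor
          · intro i hi
            dsimp only
            by_cases him : i = m
            · subst him
              rw [if_pos rfl]
              exact ⟨hrm, hrcap, heq.symm⟩
            · rw [if_neg him]
              obtain ⟨h1, h2, h3⟩ := hg'.1 i (by omega)
              exact ⟨h1, le_trans h2 hrcap, h3⟩
          · intro i hi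
            dsimp only
            by_cases him : i + 1 = m
            · rw [if_neg (by omega), if_pos him]
              exact (hg'.1 i (by omega)).2.1
            · rw [if_neg (by omega), if_neg him]
              exact hg'.2 i (by omega)
        · intro q hq i hi
          dsimp only
          have hqm : q m ≤ r := by
            obtain ⟨h1, h2, h3⟩ := hq.1 m (by omega)
            by_contra hgt
            exact hmax (q m) (by omega) (by omega) h3.symm
          have hrestr : PartialOK sL tL m r q := by
            refine ⟨fun i hi => ?_, fun i hi => hq.2 i (by omega)⟩
            obtain ⟨h1, h2, h3⟩ := hq.1 i (by omega)
            exact ⟨h1, le_trans (partial_chain hq (by omega) (by omega)) hqm, h3⟩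
          by_cases him : i = m
          · subst him
            rw [if_pos rfl]
            exact hqm
          · rw [if_neg him]
            exact hgmax' q hrestr i (by omega)
        · rw [hval']
          have hcongr : pvDisp (fun i => if i = m then r else g' i) m = pvDisp g' m := by
            apply pvDisp_congr
            intro i hi
            rw [if_neg (by omega)]
          have hstep : pvDisp (fun i => if i = m then r else g' i) (m + 1)
              = max (pvDisp g' m) (m - r) := by
            rw [pvDisp_succ, hcongr, if_pos rfl]
          rw [hstep]
          congr 1
          rw [Nat.cast_max, max_assoc, max_comm ((m - r : Nat) : Int) ((pvDisp g' m : Nat) : Int)]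
      · right
        refine ⟨?_, hval'⟩
        intro q hq
        apply hno' q
        have hqm : q m ≤ r := by
          obtain ⟨h1, h2, h3⟩ := hq.1 m (by omega)
          by_contra hgt
          exact hmax (q m) (by omega) (by omega) h3.symm
        refine ⟨fun i hi => ?_, fun i hi => hq.2 i (by omega)⟩
        obtain ⟨h1, h2, h3⟩ := hq.1 i (by omega)
        exact ⟨h1, le_trans (partial_chain hq (by omega) (by omega)) hqm, h3⟩

theorem rangeMap_getD (n : Nat) (f : Nat → Char) (i : Nat) (hi : i < n) :
    ((List.range n).map f).getD i ' ' = f i := by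
  rw [List.getD_eq_getElem _ _ (by simpa using hi)]
  simp

theorem reach_iff_map (sL tL : List Char) (hlen : tL.length = sL.length) (k : Nat) :
    PReach sL k tL ↔
      ∃ p, PartialOK sL tL sL.length sL.length p ∧ ∀ i, i < sL.length → i ≤ p i + k := by
  constructor
  · intro hreach
    induction k generalizing tL with
    | zero =>
      simp only [PReach] at hreach
      subst hreach
      refine ⟨fun i => i, ⟨fun i hi => ⟨le_refl i, by dsimp only; omega, rfl⟩,
        fun i hi => by dsimp only; omega⟩, fun i hi => by dsimp only; omega⟩
    | succ k ih =>
      obtain ⟨c, hc, hstep⟩ := hreach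
      have hclen : c.length = sL.length := preach_length hc
      obtain ⟨pc, hpc, hpd⟩ := ih c hclen hc
      classical
      refine ⟨fun i => if tL.getD i ' ' = c.getD i ' ' then pc i else pc (i - 1), ?_, ?_⟩
      · constructor
        · intro i hi
          dsimp only
          by_cases hcase : tL.getD i ' ' = c.getD i ' '
          · rw [if_pos hcase]
            obtain ⟨h1, h2, h3⟩ := hpc.1 i hi
            exact ⟨h1, h2, hcase.trans h3⟩
          · rw [if_neg hcase]
            rcases hstep.2 i (by omega) with h2 | ⟨h1, h2⟩
            · exact absurd h2 hcase
            · obtain ⟨g1, g2, g3⟩ := hpc.1 (i - 1) (by omega)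
              exact ⟨by omega, by omega, h2.trans g3⟩
        · intro i hi
          dsimp only
          have hle1 : (if tL.getD i ' ' = c.getD i ' ' then pc i else pc (i - 1)) ≤ pc i := by
            by_cases hcase : tL.getD i ' ' = c.getD i ' '
            · rw [if_pos hcase]
            · rw [if_neg hcase]
              rcases hstep.2 i (by omega) with h2 | ⟨h1, h2⟩
              · exact absurd h2 hcase
              · have := hpc.2 (i - 1) (by omega)
                have he : i - 1 + 1 = i := by omega
                rwa [he] at this
          have hle2 : pc i ≤ (if tL.getD (i+1) ' ' = c.getD (i+1) ' ' then pc (i+1) else pc (i + 1 - 1)) := by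
            by_cases hcase : tL.getD (i+1) ' ' = c.getD (i+1) ' '
            · rw [if_pos hcase]
              exact hpc.2 i hi
            · rw [if_neg hcase]
              simp
          exact le_trans hle1 hle2
      · intro i hi
        dsimp only
        by_cases hcase : tL.getD i ' ' = c.getD i ' '
        · rw [if_pos hcase]
          have := hpd i hi
          omega
        · rw [if_neg hcase]
          rcases hstep.2 i (by omega) with h2 | ⟨h1, h2⟩
          · exact absurd h2 hcase
          · have := hpd (i - 1) (by omega)
            omega
  · intro hmap
    induction k generalizing tL with
    | zero =>
      obtain ⟨p, hp, hd⟩ := hmap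
      show tL = sL
      apply list_ext_getD hlen
      intro j hj
      have hj' : j < sL.length := by omega
      obtain ⟨h1, h2, h3⟩ := hp.1 j hj'
      have hd' := hd j hj'
      have hpj : p j = j := by omega
      rw [h3, hpj]
    | succ k ih =>
      obtain ⟨p, hp, hd⟩ := hmap
      set c : List Char := (List.range sL.length).map (fun i => sL.getD (max (p i) (i - k)) ' ') with hc
      have hclen : c.length = sL.length := by simp [hc]
      have hcget : ∀ i, i < sL.length → c.getD i ' ' = sL.getD (max (p i) (i - k)) ' ' := by
        intro i hi
        rw [hc]
        exact rangeMap_getD _ _ i hi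
      have hreachc : PReach sL k c := by
        apply ih c hclen
        refine ⟨fun i => max (p i) (i - k), ⟨fun i hi => ?_, fun i hi => ?_⟩, fun i hi => ?_⟩
        · obtain ⟨h1, h2, h3⟩ := hp.1 i hi
          exact ⟨by dsimp only; omega, by dsimp only; omega, hcget i hi⟩
        · have := hp.2 i hi
          dsimp only
          omega
        · dsimp only
          omega
      refine ⟨c, hreachc, ?_, ?_⟩
      · omega
      · intro i hi
        rw [hclen] at hi
        obtain ⟨h1, h2, h3⟩ := hp.1 i hi
        have hd' := hd i hi
        by_cases hcase : i - k ≤ p i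
        · left
          rw [hcget i hi]
          have : max (p i) (i - k) = p i := by omega
          rw [this, ← h3]
        · right
          have h1i : 1 ≤ i := by omega
          refine ⟨h1i, ?_⟩
          rw [hcget (i - 1) (by omega)]
          have hpi : p i = i - k - 1 := by omega
          have hmono := hp.2 (i - 1) (by omega)
          have he : i - 1 + 1 = i := by omega
          rw [he] at hmono
          have : max (p (i - 1)) (i - 1 - k) = p i := by omega
          rw [this, ← h3]

-- ===== VERDICT (by name: the statement is the Claim_ definition above) =====
theorem bfs_min_steps_spec : Claim_equal_bfs_min_steps := by
  intro s t kmax hdom hpre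
  unfold Spec_bfs_min_steps
  by_cases hst : s = t
  · simp [bfs_min_steps, bfs_min_steps_alt, hst]
  · have hne : s.toList ≠ [] ∧ t.toList ≠ [] := by
      rcases hpre with h | h
      · exact absurd h hst
      · exact h
    obtain ⟨a, sl, hsa⟩ := List.exists_cons_of_ne_nil hne.1
    obtain ⟨b, tl2, htb⟩ := List.exists_cons_of_ne_nil hne.2
    have hgs : PySem.Str.pyGet? s 0 = some a := by
      simp [PySem.Str.pyGet?, PySem.List.pyGet?, PySem.List.pyIdx?, hsa]
    have hgt : PySem.Str.pyGet? t 0 = some b := by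
      simp [PySem.Str.pyGet?, PySem.List.pyGet?, PySem.List.pyIdx?, htb]
    have hga : s.toList.getD 0 ' ' = a := by rw [hsa]; rfl
    have hgb : t.toList.getD 0 ' ' = b := by rw [htb]; rfl
    have hn1 : 1 ≤ s.toList.length := by rw [hsa]; simp
    have hbfs0 := bfsLoop_spec s t s.toList.length hn1 rfl 0 [s] (PySem.Set.ofList [s]) kmax
      (by
        intro u
        show u ∈ PySem.Set.ofList [s] ↔ PReach s.toList 0 u.toList
        simp only [PReach]
        constructor
        · intro hu
          have he : u = s := by simpa [pysem] using hu
          rw [he]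
        · intro hu
          simp [pysem, String.toList_inj.mp hu])
      (by
        intro u
        show u ∈ [s] ↔ _
        simp only [PReach]
        constructor
        · intro hu
          have he : u = s := by simpa using hu
          exact ⟨by rw [he], fun k hk => absurd hk (by omega)⟩
        · rintro ⟨hu, _⟩
          simp [String.toList_inj.mp hu])
      (by
        show ¬ PReach s.toList 0 t.toList
        simp only [PReach]
        intro hc
        exact hst (String.toList_inj.mp hc).symm)
    rw [show ((0:Nat):Int) = (0:Int) by simp] at hbfs0
    unfold bfs_min_steps bfs_min_steps_alt
    rw [if_neg hst, if_neg hst, hgs, hgt]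
    dsimp only
    by_cases hab : a = b
    · rw [if_neg (show ¬ (a ≠ b) from fun hc => hc hab)]
      by_cases hlen : s.toList.length = t.toList.length
      · -- same length, same first character: both compute the minimal step count
        rw [if_neg (show ¬ (s.toList.length ≠ t.toList.length ∨ s.toList.length = 0) from
          fun hc => hc.elim (fun h => h hlen) (fun h => by omega))]
        rw [if_neg (show ¬ (s.toList.getD 0 ' ' ≠ t.toList.getD 0 ' ') from by
          rw [hga, hgb]; exact fun hc => hc hab)]
        rcases altLoop_spec s.toList t.toList s.toList.length s.toList.length 0 (le_refl 0) with
          ⟨g, hg, hgmax, hval⟩ | ⟨hno, hval⟩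
        · rw [hval]
          have hK : PReach s.toList (pvDisp g s.toList.length) t.toList := by
            rw [reach_iff_map s.toList t.toList hlen.symm]
            refine ⟨g, hg, ?_⟩
            intro i hi
            have h1 := le_pvDisp g hi
            have h2 := (hg.1 i hi).1
            omega
          have hKmin : ∀ k, k < pvDisp g s.toList.length → ¬ PReach s.toList k t.toList := by
            intro k hk hreach
            obtain ⟨p, hp, hd⟩ := (reach_iff_map s.toList t.toList hlen.symm k).mp hreach
            have h1 : pvDisp g s.toList.length ≤ pvDisp p s.toList.length :=
              pvDisp_anti s.toList.length (hgmax p hp)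
            have h2 : pvDisp p s.toList.length ≤ k := by
              apply pvDisp_le
              intro i hi
              have := hd i hi
              omega
            omega
          rw [hbfs0.1 (pvDisp g s.toList.length) hK hKmin]
          rw [max_eq_right (by positivity)]
        · rw [hval]
          apply hbfs0.2
          intro k hreach
          obtain ⟨p, hp, _⟩ := (reach_iff_map s.toList t.toList hlen.symm k).mp hreach
          exact hno p hp
      · -- different lengths: t is unreachable, both return -1
        rw [if_pos (show s.toList.length ≠ t.toList.length ∨ s.toList.length = 0 from Or.inl hlen)]
        apply hbfs0.2
        intro k hreach
        exact hlen (preach_length hreach).symm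
    · -- first characters differ: both return -1
      rw [if_pos (show a ≠ b from hab)]
      by_cases hlen : s.toList.length = t.toList.length
      · rw [if_neg (show ¬ (s.toList.length ≠ t.toList.length ∨ s.toList.length = 0) from
          fun hc => hc.elim (fun h => h hlen) (fun h => by omega))]
        rw [if_pos (show s.toList.getD 0 ' ' ≠ t.toList.getD 0 ' ' from by
          rw [hga, hgb]; exact hab)]
      · rw [if_pos (show s.toList.length ≠ t.toList.length ∨ s.toList.length = 0 from Or.inl hlen)]
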